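-- pv_equiv track=rewrite | github.com/sudamerushabh/cast-clone | cast-clone-backend/app/stages/treesitter/extractors/csharp.py | _resolve_base_type_fqn
-- ===== SOURCE A (Python) =====
-- def _make_fqn(namespace: str, *parts: str) -> str:
--     """Build a fully qualified name from namespace and name parts."""
--     all_parts = [p for p in (namespace, *parts) if p]
--     return ".".join(all_parts)
--
-- _BCL_ROOTS: frozenset[str] = frozenset({"System", "Microsoft"})
--
-- def _is_bcl_namespace(ns: str) -> bool:
--     """Return True if ``ns`` is (or nests under) a .NET BCL root namespace."""
--     root = ns.split(".", 1)[0]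
--     return root in _BCL_ROOTS
--
-- def _resolve_base_type_fqn(
--     bare_name: str,
--     namespace: str,
--     usings: list[str],
-- ) -> str:
--     """Resolve a base-type short name to a fully-qualified name.
--
--     Resolution order, mirroring how other C# resolvers handle imports:
--
--     1. Already-qualified names (``Foo.Bar.Base``) are returned unchanged.
--     2. If any ``using X.Y.Z;`` directive's last segment equals the short
--        name, treat it as a type alias import and return ``X.Y.Z``
--        directly (covers ``using My.App.ExternalBase;``).
--     3. Otherwise prefer the first user-land imported namespace (i.e.
--        skipping BCL namespaces like ``System.*`` and ``Microsoft.*``)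
--        as the candidate container: ``using Foo.Bar;`` +
--        ``ExternalBase`` yields ``Foo.Bar.ExternalBase``.
--     4. Fallback: assume the base type lives in the same namespace as the
--        declaring class. This preserves pre-existing behavior for bases
--        defined in the declaring file's namespace and is the rule used
--        when no user-land using is present. The edge is never dropped.
--     """
--     if "." in bare_name:
--         return bare_name
--     # Step 2: alias-style import (`using X.Y.TypeName;`).
--     for ns in usings:
--         last = ns.rsplit(".", 1)[-1]
--         if last == bare_name:
--             return ns
--     # Step 3: first non-BCL using directive as candidate container.
--     for ns in usings:
--         if _is_bcl_namespace(ns):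
--             continue
--         return f"{ns}.{bare_name}"
--     # Step 4: same-namespace fallback.
--     return _make_fqn(namespace, bare_name)
-- ===== SOURCE B (Python) =====
-- def _resolve_base_type_fqn(bare_name, namespace, usings):
--     # Single pass over usings: an alias match returns immediately; the first
--     # non-BCL directive is remembered as container candidate (a later alias
--     # still wins because we keep scanning).
--     if "." in bare_name:
--         return bare_name
--     candidate = None
--     for ns in usings:
--         if ns[ns.rfind(".") + 1:] == bare_name:
--             return ns
--         if candidate is None and ns.partition(".")[0] not in ("System", "Microsoft"):
--             candidate = ns
--     if candidate is not None:
--         return candidate + "." + bare_name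
--     if namespace and bare_name:
--         return namespace + "." + bare_name
--     return namespace or bare_name
-- ===== Notes on version B (the rewrite author's own statement) =====
-- stated objective: alternative
-- what changed: The two sequential loops over usings (alias pass, then first-non-BCL pass) are fused into a single pass that returns an alias match immediately and remembers the first non-BCL directive as a container candidate; the join-over-filtered-parts fallback becomes a plain conditional concatenation.
import Mathlib
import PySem

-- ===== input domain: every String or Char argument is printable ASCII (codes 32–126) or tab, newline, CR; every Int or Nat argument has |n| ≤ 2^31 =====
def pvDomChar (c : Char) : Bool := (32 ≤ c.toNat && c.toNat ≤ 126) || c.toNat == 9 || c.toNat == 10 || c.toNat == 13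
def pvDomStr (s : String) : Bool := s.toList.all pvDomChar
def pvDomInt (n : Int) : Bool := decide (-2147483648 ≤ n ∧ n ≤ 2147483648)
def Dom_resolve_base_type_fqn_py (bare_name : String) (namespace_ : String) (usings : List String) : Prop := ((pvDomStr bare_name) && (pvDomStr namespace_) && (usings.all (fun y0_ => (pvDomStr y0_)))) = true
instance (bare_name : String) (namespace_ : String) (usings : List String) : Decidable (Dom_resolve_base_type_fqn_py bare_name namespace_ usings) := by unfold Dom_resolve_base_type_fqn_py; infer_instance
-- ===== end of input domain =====

-- B fuses A's two loops over `usings` into one pass with a remembered container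
-- candidate and replaces the join-over-filtered-parts fallback by a conditional
-- concatenation; same return value everywhere (alternative decomposition, same cost).

-- ===== PORT A =====

-- exact port of `ns.split(".", 1)[0]` (the prefix before the first '.'; the whole
-- string when there is no '.'), used by `_is_bcl_namespace`
def pvRootSeg (cs : List Char) : List Char := cs.takeWhile (· ≠ '.')

-- exact port of `_is_bcl_namespace`: root in frozenset({"System", "Microsoft"})
def pvIsBcl (ns : String) : Bool :=
  pvRootSeg ns.toList == "System".toList || pvRootSeg ns.toList == "Microsoft".toList

-- exact port of `ns.rsplit(".", 1)[-1]` (the suffix after the LAST '.'; the whole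
-- string when there is no '.')
def pvLastSegA (cs : List Char) : List Char := (cs.reverse.takeWhile (· ≠ '.')).reverse

-- exact port of `_make_fqn(namespace, bare_name)`: drop falsy (empty) parts, join with "."
def pvMakeFqn (namespace_ bare_name : String) : String :=
  PySem.Str.join "." (([namespace_, bare_name]).filter (fun p => p ≠ ""))

-- step 3 loop: first non-BCL using as container
def pvLoop2A (bare_name : String) (namespace_ : String) : List String → String
  | [] => pvMakeFqn namespace_ bare_name
  | ns :: rest =>
    if pvIsBcl ns then pvLoop2A bare_name namespace_ rest
    else String.ofList (ns.toList ++ '.' :: bare_name.toList)   -- f"{ns}.{bare_name}"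

-- step 2 loop: alias-style import; falls through to the step-3 loop over the FULL list
def pvLoop1A (bare_name : String) (namespace_ : String) (usings : List String) : List String → String
  | [] => pvLoop2A bare_name namespace_ usings
  | ns :: rest =>
    if pvLastSegA ns.toList == bare_name.toList then ns
    else pvLoop1A bare_name namespace_ usings rest

def resolve_base_type_fqn_py (bare_name : String) (namespace_ : String) (usings : List String) : String :=
  if PySem.Str.isIn "." bare_name then bare_name
  else pvLoop1A bare_name namespace_ usings usings

-- ===== PORT B =====

-- exact port of `ns[ns.rfind(".") + 1:]`: one forward pass that restarts the
-- accumulator at every '.'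
def pvLastSegB (cs : List Char) : List Char :=
  cs.foldl (fun acc c => if c = '.' then [] else acc ++ [c]) []

-- single pass carrying the container candidate
def pvGoB (bare_name : String) (namespace_ : String) : List String → Option String → String
  | [], some c => String.ofList (c.toList ++ '.' :: bare_name.toList)
  | [], none =>
    if namespace_ ≠ "" ∧ bare_name ≠ "" then
      String.ofList (namespace_.toList ++ '.' :: bare_name.toList)
    else if namespace_ ≠ "" then namespace_ else bare_name     -- `namespace or bare_name`
  | ns :: rest, cand =>
    if pvLastSegB ns.toList == bare_name.toList then ns
    else pvGoB bare_name namespace_ rest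
      (if cand = none ∧ ¬ (pvRootSeg ns.toList == "System".toList || pvRootSeg ns.toList == "Microsoft".toList) then some ns else cand)

def resolve_base_type_fqn_py_alt (bare_name : String) (namespace_ : String) (usings : List String) : String :=
  if PySem.Str.isIn "." bare_name then bare_name
  else pvGoB bare_name namespace_ usings none

-- ===== PRECONDITION & SPEC =====
def Spec_resolve_base_type_fqn_py (bare_name : String) (namespace_ : String) (usings : List String) (out : String) : Prop := out = resolve_base_type_fqn_py_alt bare_name namespace_ usings
instance (bare_name : String) (namespace_ : String) (usings : List String) (out : String) : Decidable (Spec_resolve_base_type_fqn_py bare_name namespace_ usings out) := by unfold Spec_resolve_base_type_fqn_py; infer_instance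

-- ===== CLAIM (what is proved, stated in full; the proofs are below) =====
def Claim_equal_resolve_base_type_fqn_py : Prop := ∀ (bare_name : String) (namespace_ : String) (usings : List String), Dom_resolve_base_type_fqn_py bare_name namespace_ usings → Spec_resolve_base_type_fqn_py bare_name namespace_ usings (resolve_base_type_fqn_py bare_name namespace_ usings)

-- ===== LEMMAS AND PROOFS =====

-- the reverse-side characterisation used by both last-segment ports
theorem pvAllNe (cs : List Char) (h : '.' ∉ cs) : cs.reverse.takeWhile (· ≠ '.') = cs.reverse := by
  apply List.takeWhile_eq_self_iff.mpr
  intro a ha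
  simp only [ne_eq, decide_eq_true_eq]
  rintro rfl
  exact h (List.mem_reverse.mp ha)

theorem pvLastSegA_no_dot (cs : List Char) (h : '.' ∉ cs) : pvLastSegA cs = cs := by
  unfold pvLastSegA; rw [pvAllNe cs h, List.reverse_reverse]

theorem pvLastSegA_cons_of_mem (c : Char) (cs : List Char) (h : '.' ∈ cs) :
    pvLastSegA (c :: cs) = pvLastSegA cs := by
  unfold pvLastSegA
  rw [List.reverse_cons, List.takeWhile_append, if_neg]
  intro hl
  have heq := List.IsPrefix.eq_of_length (List.takeWhile_prefix _) hl
  have := List.takeWhile_eq_self_iff.mp heq '.' (List.mem_reverse.mpr h)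
  simp at this

theorem pvLastSegA_dot_cons (cs : List Char) (h : '.' ∉ cs) : pvLastSegA ('.' :: cs) = cs := by
  unfold pvLastSegA
  rw [List.reverse_cons, List.takeWhile_append, if_pos (by rw [pvAllNe cs h])]
  simp

theorem pvLastSegB_foldl (cs : List Char) :
    ∀ acc, cs.foldl (fun acc c => if c = '.' then [] else acc ++ [c]) acc
      = if '.' ∈ cs then pvLastSegA cs else acc ++ cs := by
  induction cs with
  | nil => simp
  | cons c cs ih =>
    intro acc
    by_cases hc : c = '.'
    · subst hc
      simp only [List.foldl_cons]
      rw [ih]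
      by_cases h : '.' ∈ cs
      · simp [h, pvLastSegA_cons_of_mem _ _ h]
      · simp [h, pvLastSegA_dot_cons _ h]
    · simp only [List.foldl_cons, if_neg hc]
      rw [ih]
      by_cases h : '.' ∈ cs
      · simp [h, pvLastSegA_cons_of_mem _ _ h]
      · have h' : '.' ∉ c :: cs := by
          intro hm
          rcases List.mem_cons.mp hm with he | hm2
          · exact hc he.symm
          · exact h hm2
        simp [h, h']

-- the two last-segment ports compute the same segment
theorem pvLastSeg_eq (cs : List Char) : pvLastSegB cs = pvLastSegA cs := by
  unfold pvLastSegB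
  rw [pvLastSegB_foldl cs []]
  by_cases h : '.' ∈ cs
  · simp [h]
  · simp [h, pvLastSegA_no_dot cs h]

-- first alias match, used to characterise both loops
def pvAlias (bare_name : String) : List String → Option String
  | [] => none
  | ns :: rest => if pvLastSegA ns.toList == bare_name.toList then some ns else pvAlias bare_name rest

-- first non-BCL directive
def pvFirstNonBcl : List String → Option String
  | [] => none
  | ns :: rest => if pvIsBcl ns then pvFirstNonBcl rest else some ns

theorem pvLoop2A_char (bn nsp : String) (l : List String) :
    pvLoop2A bn nsp l = match pvFirstNonBcl l with
      | some c => String.ofList (c.toList ++ '.' :: bn.toList)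
      | none => pvMakeFqn nsp bn := by
  induction l with
  | nil => rfl
  | cons ns rest ih =>
    by_cases h : pvIsBcl ns = true
    · simp [pvLoop2A, pvFirstNonBcl, h, ih]
    · simp [pvLoop2A, pvFirstNonBcl, h]

theorem pvLoop1A_char (bn nsp : String) (us l : List String) :
    pvLoop1A bn nsp us l = match pvAlias bn l with
      | some ns => ns
      | none => pvLoop2A bn nsp us := by
  induction l with
  | nil => rfl
  | cons ns rest ih =>
    by_cases h : (pvLastSegA ns.toList == bn.toList) = true
    · simp [pvLoop1A, pvAlias, h]
    · simp [pvLoop1A, pvAlias, h, ih]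

theorem pvMakeFqn_eq (nsp bn : String) :
    pvMakeFqn nsp bn =
      (if nsp ≠ "" ∧ bn ≠ "" then String.ofList (nsp.toList ++ '.' :: bn.toList)
       else if nsp ≠ "" then nsp else bn) := by
  unfold pvMakeFqn
  by_cases h1 : nsp = "" <;> by_cases h2 : bn = "" <;>
    simp [h1, h2, PySem.Str.join, PySem.Chars.join, List.intercalate]

theorem pvGoB_char (bn nsp : String) (l : List String) :
    ∀ cand, pvGoB bn nsp l cand = match pvAlias bn l with
      | some ns => ns
      | none => match cand.or (pvFirstNonBcl l) with
        | some c => String.ofList (c.toList ++ '.' :: bn.toList)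
        | none => if nsp ≠ "" ∧ bn ≠ "" then String.ofList (nsp.toList ++ '.' :: bn.toList)
                  else if nsp ≠ "" then nsp else bn := by
  induction l with
  | nil => intro cand; cases cand <;> rfl
  | cons ns rest ih =>
    intro cand
    by_cases h : (pvLastSegA ns.toList == bn.toList) = true
    · simp [pvGoB, pvAlias, pvLastSeg_eq, h]
    · rw [show pvGoB bn nsp (ns :: rest) cand
          = pvGoB bn nsp rest
              (if cand = none ∧ ¬ (pvRootSeg ns.toList == "System".toList || pvRootSeg ns.toList == "Microsoft".toList) then some ns else cand) by
        simp [pvGoB, pvLastSeg_eq, h]]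
      rw [ih]
      cases cand with
      | some c => simp [pvAlias, h, Option.or]
      | none =>
        by_cases hb : pvIsBcl ns = true
        · have hb2 : pvRootSeg ns.toList = ['S','y','s','t','e','m'] ∨ pvRootSeg ns.toList = ['M','i','c','r','o','s','o','f','t'] := by
            simpa [pvIsBcl] using hb
          have hcond : ¬ (¬pvRootSeg ns.toList = ['S','y','s','t','e','m'] ∧ ¬pvRootSeg ns.toList = ['M','i','c','r','o','s','o','f','t']) := by
            tauto
          simp [pvAlias, pvFirstNonBcl, h, hb, hcond]
        · have hb2 : ¬pvRootSeg ns.toList = ['S','y','s','t','e','m'] ∧ ¬pvRootSeg ns.toList = ['M','i','c','r','o','s','o','f','t'] := by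
            simpa [pvIsBcl] using hb
          simp [pvAlias, pvFirstNonBcl, h, hb, hb2.1, hb2.2, Option.or]

-- ===== VERDICT (by name: the statement is the Claim_ definition above) =====
theorem resolve_base_type_fqn_py_spec : Claim_equal_resolve_base_type_fqn_py := by
  intro bn nsp us _
  unfold Spec_resolve_base_type_fqn_py resolve_base_type_fqn_py resolve_base_type_fqn_py_alt
  by_cases h : PySem.Str.isIn "." bn = true
  · simp only [h, if_pos]
  · simp only [h, Bool.false_eq_true, if_false]
    rw [pvLoop1A_char, pvGoB_char, pvLoop2A_char]
    cases pvAlias bn us with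
    | some ns => rfl
    | none =>
      simp only [Option.none_or]
      cases pvFirstNonBcl us with
      | some c => rfl
      | none => exact pvMakeFqn_eq nsp bn
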